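-- pv_equiv track=rewrite | github.com/klebgenomics/KleborateModular | kleborate/shared/resMinimap.py | get_res_headers
-- ===== SOURCE A (Python) =====
-- def get_res_headers(res_classes, bla_classes):
--     res_headers = res_classes + bla_classes
--
--     # Rearrange the headers a bit. First move Bla_chr to the end:
--     res_headers = ([h for h in res_headers if h != 'Bla_chr'] +
--                    [h for h in res_headers if h == 'Bla_chr'])
--
--     # Then move mutation columns to the end:
--     res_headers = ([h for h in res_headers if '_mutations' not in h] +
--                    [h for h in res_headers if '_mutations' in h])
--
--     # Add '_acquired' to the end of the rest of the columns:
--     res_headers = [h if h.endswith('_chr') or h.endswith('_mutations') else h + '_acquired'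
--                    for h in res_headers]
--
--     return res_headers
-- ===== SOURCE B (Python) =====
-- def get_res_headers(res_classes, bla_classes):
--     def key(h):
--         return 2 if '_mutations' in h else (1 if h == 'Bla_chr' else 0)
--     ordered = sorted(res_classes + bla_classes, key=key)
--     return [h if h.endswith('_chr') or h.endswith('_mutations') else h + '_acquired'
--             for h in ordered]
-- ===== Notes on version B (the rewrite author's own statement) =====
-- stated objective: simpler
-- what changed: Replaced A's three successive partition-and-rebuild passes (two filter-pair concatenations plus a suffixing comprehension) by one stable sorted() over a 3-valued category key followed by a single suffixing comprehension.
import Mathlib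
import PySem

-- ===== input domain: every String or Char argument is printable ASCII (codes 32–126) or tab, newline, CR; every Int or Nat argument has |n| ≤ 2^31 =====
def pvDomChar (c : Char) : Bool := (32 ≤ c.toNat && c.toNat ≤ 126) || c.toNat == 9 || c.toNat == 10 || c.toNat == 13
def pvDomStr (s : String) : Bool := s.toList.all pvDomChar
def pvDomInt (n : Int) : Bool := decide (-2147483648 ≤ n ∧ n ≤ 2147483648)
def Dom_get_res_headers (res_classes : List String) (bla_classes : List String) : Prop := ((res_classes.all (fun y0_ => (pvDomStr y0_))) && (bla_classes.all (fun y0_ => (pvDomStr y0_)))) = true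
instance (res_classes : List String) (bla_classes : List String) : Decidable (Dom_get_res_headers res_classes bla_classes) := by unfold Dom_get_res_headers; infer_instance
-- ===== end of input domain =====

-- B replaces A's three successive partition/rebuild passes by one stable sort with a
-- 3-valued category key plus a single suffixing map (objective: simpler, same cost).

-- ===== PORT A =====
def get_res_headers (res_classes : List String) (bla_classes : List String) : List String :=
  let res_headers0 := res_classes ++ bla_classes
  -- move Bla_chr to the end
  let res_headers1 := res_headers0.filter (fun h => h ≠ "Bla_chr") ++
                      res_headers0.filter (fun h => h = "Bla_chr")
  -- move mutation columns to the end
  let res_headers2 := res_headers1.filter (fun h => ¬ PySem.Str.isIn "_mutations" h) ++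
                      res_headers1.filter (fun h => PySem.Str.isIn "_mutations" h)
  -- add '_acquired' to the rest
  res_headers2.map (fun h =>
    if PySem.Str.endswith h "_chr" || PySem.Str.endswith h "_mutations" then h
    else h ++ "_acquired")

-- ===== PORT B =====
def pvCatKey (h : String) : Nat :=
  if PySem.Str.isIn "_mutations" h then 2 else if h = "Bla_chr" then 1 else 0

def get_res_headers_alt (res_classes : List String) (bla_classes : List String) : List String :=
  (PySem.List.sorted (res_classes ++ bla_classes) pvCatKey false).map (fun h =>
    if PySem.Str.endswith h "_chr" || PySem.Str.endswith h "_mutations" then h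
    else h ++ "_acquired")

-- ===== PRECONDITION & SPEC =====
def Spec_get_res_headers (res_classes : List String) (bla_classes : List String) (out : List String) : Prop := out = get_res_headers_alt res_classes bla_classes
instance (res_classes : List String) (bla_classes : List String) (out : List String) : Decidable (Spec_get_res_headers res_classes bla_classes out) := by unfold Spec_get_res_headers; infer_instance

-- ===== CLAIM (what is proved, stated in full; the proofs are below) =====
def Claim_equal_get_res_headers : Prop := ∀ (res_classes : List String) (bla_classes : List String), Dom_get_res_headers res_classes bla_classes → Spec_get_res_headers res_classes bla_classes (get_res_headers res_classes bla_classes)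

-- ===== LEMMAS AND PROOFS =====

-- Inserting x into A ++ B places it between A (keys ≤ key x) and B (keys > key x).
lemma insertBy_split {α : Type} (key : α → Nat) (x : α) (A B : List α)
    (hA : ∀ a ∈ A, key a ≤ key x) (hB : ∀ b ∈ B, key x < key b) :
    PySem.List.insertBy (fun a b => decide (key a < key b)) x (A ++ B) = A ++ x :: B := by
  induction A with
  | nil =>
    cases B with
    | nil => simp [PySem.List.insertBy]
    | cons b bs =>
      have := hB b (by simp)
      simp [PySem.List.insertBy, this]
  | cons a A' ih =>
    have h1 : ¬ key x < key a := by
      have := hA a (by simp); omega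
    simp only [List.cons_append, PySem.List.insertBy, decide_eq_true_eq]
    rw [if_neg h1, ih (fun a ha => hA a (by simp [ha]))]

-- A stable sort by a key bounded by 2 is the concatenation of the three key classes.
lemma sorted_key_le_two {α : Type} (xs : List α) (key : α → Nat) (hk : ∀ x ∈ xs, key x ≤ 2) :
    PySem.List.sorted xs key false =
      xs.filter (fun x => key x == 0) ++ xs.filter (fun x => key x == 1) ++
      xs.filter (fun x => key x == 2) := by
  induction xs using List.reverseRecOn with
  | nil => simp [PySem.List.sorted]
  | append_singleton xs x ih =>
    rw [PySem.List.sorted_eq_foldl_insertBy, List.foldl_append] at *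
    simp only [List.foldl_cons, List.foldl_nil]
    rw [ih (fun y hy => hk y (by simp [hy]))]
    have hx : key x ≤ 2 := hk x (by simp)
    have mem0 : ∀ a ∈ xs.filter (fun x => key x == 0), key a = 0 := by
      intro a ha; simpa using (List.of_mem_filter ha)
    have mem1 : ∀ a ∈ xs.filter (fun x => key x == 1), key a = 1 := by
      intro a ha; simpa using (List.of_mem_filter ha)
    have mem2 : ∀ a ∈ xs.filter (fun x => key x == 2), key a = 2 := by
      intro a ha; simpa using (List.of_mem_filter ha)
    interval_cases h : key x
    · have h0 := insertBy_split key x (xs.filter (fun x => key x == 0))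
        (xs.filter (fun x => key x == 1) ++ xs.filter (fun x => key x == 2))
        (fun a ha => by rw [mem0 a ha, h])
        (fun b hb => by
          rcases List.mem_append.1 hb with hb | hb
          · rw [mem1 b hb, h]; omega
          · rw [mem2 b hb, h]; omega)
      rw [List.append_assoc, h0]
      simp [List.filter_append, h]
    · have h1 := insertBy_split key x
        (xs.filter (fun x => key x == 0) ++ xs.filter (fun x => key x == 1))
        (xs.filter (fun x => key x == 2))
        (fun a ha => by
          rcases List.mem_append.1 ha with ha | ha
          · rw [mem0 a ha, h]; omega
          · rw [mem1 a ha, h])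
        (fun b hb => by rw [mem2 b hb, h]; omega)
      rw [h1]
      simp [List.filter_append, h]
    · rw [PySem.List.insertBy_of_forall_not_before _ x _ (fun y hy => by
        simp only [List.mem_append] at hy
        rcases hy with hy | hy
        · rcases hy with hy | hy
          · simp [mem0 y hy, h]
          · simp [mem1 y hy, h]
        · simp [mem2 y hy, h])]
      simp [List.filter_append, h]

-- A's double partition of xs equals the three pvCatKey classes in order.
lemma partitions_eq_classes (xs : List String) :
    ((xs.filter (fun h => h ≠ "Bla_chr") ++ xs.filter (fun h => h = "Bla_chr")).filter
        (fun h => ¬ PySem.Str.isIn "_mutations" h) ++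
     (xs.filter (fun h => h ≠ "Bla_chr") ++ xs.filter (fun h => h = "Bla_chr")).filter
        (fun h => PySem.Str.isIn "_mutations" h)) =
    xs.filter (fun x => pvCatKey x == 0) ++ xs.filter (fun x => pvCatKey x == 1) ++
    xs.filter (fun x => pvCatKey x == 2) := by
  simp only [List.filter_append, List.filter_filter]
  have e0 : xs.filter (fun h => decide ¬ PySem.Str.isIn "_mutations" h = true && decide (h ≠ "Bla_chr"))
      = xs.filter (fun x => pvCatKey x == 0) := by
    apply List.filter_congr; intro h _
    by_cases hb : h = "Bla_chr"
    · subst hb; decide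
    · cases hm : PySem.Str.isIn "_mutations" h <;>
        simp only [PySem.Str.isIn_eq] at hm <;>
        rw [show ("_mutations".toList) = ['_','m','u','t','a','t','i','o','n','s'] from rfl] at hm <;>
        simp [pvCatKey, hb, hm]
  have e1 : xs.filter (fun h => decide ¬ PySem.Str.isIn "_mutations" h = true && decide (h = "Bla_chr"))
      = xs.filter (fun x => pvCatKey x == 1) := by
    apply List.filter_congr; intro h _
    by_cases hb : h = "Bla_chr"
    · subst hb; decide
    · cases hm : PySem.Str.isIn "_mutations" h <;>
        simp only [PySem.Str.isIn_eq] at hm <;>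
        rw [show ("_mutations".toList) = ['_','m','u','t','a','t','i','o','n','s'] from rfl] at hm <;>
        simp [pvCatKey, hb, hm]
  have e2 : xs.filter (fun h => PySem.Str.isIn "_mutations" h && decide (h ≠ "Bla_chr"))
      = xs.filter (fun x => pvCatKey x == 2) := by
    apply List.filter_congr; intro h _
    by_cases hb : h = "Bla_chr"
    · subst hb; decide
    · cases hm : PySem.Str.isIn "_mutations" h <;>
        simp only [PySem.Str.isIn_eq] at hm <;>
        rw [show ("_mutations".toList) = ['_','m','u','t','a','t','i','o','n','s'] from rfl] at hm <;>
        simp [pvCatKey, hb, hm]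
  have e3 : xs.filter (fun h => PySem.Str.isIn "_mutations" h && decide (h = "Bla_chr")) = [] := by
    rw [List.filter_eq_nil_iff]
    intro h _
    by_cases hb : h = "Bla_chr"
    · subst hb; decide
    · simp [hb]
  rw [e0, e1, e2, e3]
  simp

-- ===== VERDICT (by name: the statement is the Claim_ definition above) =====
theorem get_res_headers_spec : Claim_equal_get_res_headers := by
  intro res bla _
  show get_res_headers res bla = get_res_headers_alt res bla
  unfold get_res_headers get_res_headers_alt
  rw [sorted_key_le_two _ pvCatKey (fun x _ => by unfold pvCatKey; split_ifs <;> omega)]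
  rw [← partitions_eq_classes]
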